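-- pv_equiv track=rewrite | github.com/hommat/matura | zbior/68/zad1.py | check
-- ===== SOURCE A (Python) =====
-- def check(s1, s2):
--   if len(s1) != len(s2):
--     return False
--
--   s1_letter = s1[0]
--   s2_letter = s2[0]
--
--   for letter in s1:
--     if letter != s1_letter:
--       return False
--
--   for letter in s2:
--     if letter != s2_letter:
--       return False
--
--   return s1_letter == s2_letter
-- ===== SOURCE B (Python) =====
-- def check(s1, s2):
--   return s1 == s2 and len(set(s1)) == 1
-- ===== Notes on version B (the rewrite author's own statement) =====
-- stated objective: simpler
-- what changed: Replaces the length guard plus two scan-for-a-differing-character loops and representative comparison by the observation that A returns True iff the strings are identical and consist of a single repeated character: B is one line, `s1 == s2 and len(set(s1)) == 1`.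
-- outside the precondition, e.g. on check('', ''): A raises IndexError, B returns False
-- crash fix: A raises IndexError exactly when both strings are empty (equal lengths, then s1[0]); B returns False there since len(set(''))==1 fails. — e.g. on check("", ""): A raises IndexError, B returns false
import Mathlib
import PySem

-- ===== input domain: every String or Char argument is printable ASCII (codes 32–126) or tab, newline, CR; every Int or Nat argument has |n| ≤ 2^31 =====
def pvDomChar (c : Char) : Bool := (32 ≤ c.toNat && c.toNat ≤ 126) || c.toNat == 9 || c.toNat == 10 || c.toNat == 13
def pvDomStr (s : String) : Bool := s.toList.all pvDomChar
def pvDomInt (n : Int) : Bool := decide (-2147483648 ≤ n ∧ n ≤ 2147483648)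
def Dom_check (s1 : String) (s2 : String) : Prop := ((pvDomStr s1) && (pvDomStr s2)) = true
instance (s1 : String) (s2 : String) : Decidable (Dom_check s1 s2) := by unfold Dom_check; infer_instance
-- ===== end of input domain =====

-- B: one line `s1 == s2 and len(set(s1)) == 1` replaces A's length guard, two scan loops and representative comparison (simpler, same O(n)).


-- ===== PORT A =====
def check (s1 : String) (s2 : String) : Bool :=
  if s1.toList.length ≠ s2.toList.length then false
  else
    match PySem.Str.pyGet? s1 0, PySem.Str.pyGet? s2 0 with
    | some s1_letter, some s2_letter =>
      -- 'for letter in s1: if letter != s1_letter: return False' = early-false scan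
      if s1.toList.any (fun letter => letter != s1_letter) then false
      else if s2.toList.any (fun letter => letter != s2_letter) then false
      else s1_letter == s2_letter
    | _, _ => false   -- IndexError in Python; excluded by Pre_check

-- ===== PORT B =====
def check_alt (s1 : String) (s2 : String) : Bool :=
  (s1 == s2) && (PySem.Set.len (PySem.Set.ofList s1.toList) == 1)

-- ===== PRECONDITION & SPEC =====
-- Pre_ excludes only the pair of two empty strings, on which A raises IndexError at s1[0].
def Pre_check (s1 : String) (s2 : String) : Prop := ¬ (s1.toList = [] ∧ s2.toList = [])
instance (s1 : String) (s2 : String) : Decidable (Pre_check s1 s2) := by unfold Pre_check; infer_instance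
def pvWitness_check : String × String := ("aa", "aa")

-- A raises IndexError exactly when both strings are empty; B returns False there.
def Raises_check (s1 : String) (s2 : String) : Prop := s1.toList = [] ∧ s2.toList = []
instance (s1 : String) (s2 : String) : Decidable (Raises_check s1 s2) := by unfold Raises_check; infer_instance
def pvRaiseWitness_check : String × String := ("", "")
def pvRaiseWitnessOut_check : Bool := false

def Spec_check (s1 : String) (s2 : String) (out : Bool) : Prop := out = check_alt s1 s2
instance (s1 : String) (s2 : String) (out : Bool) : Decidable (Spec_check s1 s2 out) := by unfold Spec_check; infer_instance

-- ===== CLAIM (what is proved, stated in full; the proofs are below) =====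
def Claim_equal_check : Prop := ∀ (s1 : String) (s2 : String), Dom_check s1 s2 → Pre_check s1 s2 → Spec_check s1 s2 (check s1 s2)
def Claim_raises_check : Prop := (∀ (s1 : String) (s2 : String), Dom_check s1 s2 → Raises_check s1 s2 → ¬ Pre_check s1 s2) ∧ (Dom_check (pvRaiseWitness_check.1) (pvRaiseWitness_check.2) ∧ Raises_check (pvRaiseWitness_check.1) (pvRaiseWitness_check.2) ∧ check_alt (pvRaiseWitness_check.1) (pvRaiseWitness_check.2) = pvRaiseWitnessOut_check)

-- ===== LEMMAS AND PROOFS =====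

-- the accumulator of Set.add never shrinks
theorem pv_len_le_foldl_add (t : List Char) : ∀ (s : PySem.Set Char),
    s.length ≤ (t.foldl PySem.Set.add s).length := by
  induction t with
  | nil => intro s; simp
  | cons x t ih =>
    intro s
    have h := ih (PySem.Set.add s x)
    have : s.length ≤ (PySem.Set.add s x).length := by
      simp [PySem.Set.add]; split <;> simp
    simpa using le_trans this h

-- set built from c::t has exactly one element iff every element of t equals c
theorem pv_uniform_iff (t : List Char) : ∀ (c : Char),
    ((t.foldl PySem.Set.add [c]).length = 1 ↔ ∀ x ∈ t, x = c) := by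
  induction t with
  | nil => intro c; simp
  | cons x t ih =>
    intro c
    by_cases hx : x = c
    · subst hx
      have hadd : PySem.Set.add [x] x = [x] := by simp [PySem.Set.add]
      simp [ih x]
    · have hadd : PySem.Set.add [c] x = [c, x] := by
        simp [PySem.Set.add, PySem.Set.contains]
        intro h; exact hx h
      have h2 : 2 ≤ ((x :: t).foldl PySem.Set.add [c]).length := by
        simpa [hadd] using pv_len_le_foldl_add t [c, x]
      constructor
      · intro h1; omega
      · intro h; exact absurd (h x (by simp)) hx

theorem pv_beq_false_of_ne_lists (s1 s2 : String) (h : s1.toList ≠ s2.toList) :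
    (s1 == s2) = false := by
  rw [Bool.eq_false_iff]
  intro hb
  exact h (congrArg String.toList (eq_of_beq hb))

-- ===== VERDICT (by name: the statement is the Claim_ definition above) =====
theorem check_raises : Claim_raises_check := by
  unfold Claim_raises_check
  exact ⟨fun s1 s2 _ hr hp => hp hr, by decide⟩

theorem check_spec : Claim_equal_check := by
  intro s1 s2 _hdom hpre
  unfold Spec_check check check_alt
  rcases h1 : s1.toList with _ | ⟨c1, t1⟩
  · rcases h2 : s2.toList with _ | ⟨c2, t2⟩
    · exact absurd hpre (check_raises.1 s1 s2 _hdom ⟨h1, h2⟩)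
    · have hb := pv_beq_false_of_ne_lists s1 s2 (by rw [h1, h2]; simp)
      simp [hb]
  · rcases h2 : s2.toList with _ | ⟨c2, t2⟩
    · have hb := pv_beq_false_of_ne_lists s1 s2 (by rw [h1, h2]; simp)
      simp [hb]
    · -- both nonempty
      have hget1 : PySem.Str.pyGet? s1 0 = some c1 := by
        simp [PySem.Str.pyGet?, PySem.Chars.pyGet?, PySem.List.pyGet?, PySem.List.pyIdx?, h1]
      have hget2 : PySem.Str.pyGet? s2 0 = some c2 := by
        simp [PySem.Str.pyGet?, PySem.Chars.pyGet?, PySem.List.pyGet?, PySem.List.pyIdx?, h2]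
      have hadd0 : PySem.Set.add [] c1 = [c1] := by simp [PySem.Set.add, PySem.Set.contains]
      have hone : ((PySem.Set.ofList s1.toList).length = 1) ↔ ∀ x ∈ t1, x = c1 := by
        rw [h1]
        show (((c1 :: t1).foldl PySem.Set.add []).length = 1) ↔ _
        rw [List.foldl_cons, hadd0]; exact pv_uniform_iff t1 c1
      rw [Bool.eq_iff_iff]
      simp only [hget1, hget2]
      simp [PySem.Set.len]
      rw [h1] at hone
      rw [show (s1 = s2) ↔ (s1.toList = s2.toList) from String.toList_inj.symm, h1, h2, hone]
      constructor
      · rintro ⟨hl, hu1, hu2, hc⟩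
        refine ⟨?_, hu1⟩
        rw [List.eq_replicate_of_mem hu1, List.eq_replicate_of_mem hu2, hl, hc]
      · rintro ⟨heq, hu1⟩
        obtain ⟨hc, ht⟩ : c1 = c2 ∧ t1 = t2 := by simpa using heq
        subst hc; subst ht
        exact ⟨rfl, hu1, hu1, rfl⟩
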